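-- pv_equiv track=rewrite | github.com/geemaple/leetcode | leetcode/392.is-subsequence.py | batch_is_subsequence
-- ===== SOURCE A (Python) =====
-- from collections import defaultdict
-- import bisect
--
-- def batch_is_subsequence(t: str, s_list: list[str]) -> list[bool]:
--     pos = defaultdict(list)
--     for i, c in enumerate(t):
--         pos[c].append(i)
--
--     def is_subsequence(s: str) -> bool:
--         prev_index = -1
--         for c in s:
--             if c not in pos:
--                 return False
--
--             i = bisect.bisect_right(pos[c], prev_index)
--             if i == len(pos[c]):
--                 return False
--             prev_index = pos[c][i]
--         return True
--
--     return [is_subsequence(s) for s in s_list]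
-- ===== SOURCE B (Python) =====
-- def batch_is_subsequence(t: str, s_list: list[str]) -> list[bool]:
--     res = []
--     for s in s_list:
--         i = 0
--         for ch in t:
--             if i < len(s) and s[i] == ch:
--                 i += 1
--         res.append(i == len(s))
--     return res
-- ===== Notes on version B (the rewrite author's own statement) =====
-- stated objective: simpler
-- what changed: Replaces A's precomputed per-character position table plus bisect binary search by a direct two-pointer greedy scan of t for each string.
import Mathlib
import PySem

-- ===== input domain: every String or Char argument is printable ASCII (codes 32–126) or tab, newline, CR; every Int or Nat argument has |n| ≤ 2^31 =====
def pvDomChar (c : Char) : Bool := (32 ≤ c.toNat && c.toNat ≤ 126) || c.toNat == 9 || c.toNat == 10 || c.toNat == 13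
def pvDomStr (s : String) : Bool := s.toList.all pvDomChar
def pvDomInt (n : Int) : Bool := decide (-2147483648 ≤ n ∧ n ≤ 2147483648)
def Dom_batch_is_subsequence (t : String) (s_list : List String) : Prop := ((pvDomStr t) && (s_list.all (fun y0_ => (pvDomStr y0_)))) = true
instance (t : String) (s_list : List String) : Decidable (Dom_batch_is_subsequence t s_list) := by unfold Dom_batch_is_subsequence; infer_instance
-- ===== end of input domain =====

-- B replaces A's precomputed per-character position table + bisect by a direct two-pointer
-- greedy scan of t for each string (objective: simpler; not claimed faster).

-- ===== PORT A =====
-- 'pos = defaultdict(list); for i, c in enumerate(t): pos[c].append(i)'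
def buildPos (tl : List Char) : PySem.Dict Char (List Int) :=
  (PySem.List.enumerate tl).foldl (fun d p => d.modify p.2 [] (fun xs => xs ++ [p.1])) PySem.Dict.empty

-- the inner 'is_subsequence' loop; early returns become nested ifs
def isSubA (pos : PySem.Dict Char (List Int)) : List Char → Int → Bool
  | [], _ => true
  | c :: s, prev =>
    if pos.contains c = false then false
    else
      let l := pos.getD c []
      let i := PySem.List.bisectRight l prev
      if i = l.length then false
      else isSubA pos s (l.getD i 0)

def batch_is_subsequence (t : String) (s_list : List String) : List Bool :=
  let pos := buildPos t.toList
  s_list.map (fun s => isSubA pos s.toList (-1))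

-- ===== PORT B =====
def batch_is_subsequence_alt (t : String) (s_list : List String) : List Bool :=
  s_list.map (fun s =>
    let sl := s.toList
    let i := t.toList.foldl (fun i ch => if i < sl.length ∧ sl.getD i 'a' = ch then i + 1 else i) (0 : Nat)
    decide (i = sl.length))

-- ===== PRECONDITION & SPEC =====
def Spec_batch_is_subsequence (t : String) (s_list : List String) (out : List Bool) : Prop := out = batch_is_subsequence_alt t s_list
instance (t : String) (s_list : List String) (out : List Bool) : Decidable (Spec_batch_is_subsequence t s_list out) := by unfold Spec_batch_is_subsequence; infer_instance

-- ===== CLAIM (what is proved, stated in full; the proofs are below) =====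
def Claim_equal_batch_is_subsequence : Prop := ∀ (t : String) (s_list : List String), Dom_batch_is_subsequence t s_list → Spec_batch_is_subsequence t s_list (batch_is_subsequence t s_list)

-- ===== LEMMAS AND PROOFS =====

-- canonical greedy subsequence check: subAux s u = "s is a subsequence of u"
def subAux : List Char → List Char → Bool
  | [], _ => true
  | _ :: _, [] => false
  | c :: s, b :: u => if b = c then subAux s u else subAux (c :: s) u

theorem subAux_not_mem (c : Char) (s u : List Char) (h : c ∉ u) : subAux (c :: s) u = false := by
  induction u with
  | nil => rfl
  | cons b v ih =>
    simp only [List.mem_cons, not_or] at h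
    have hbc : ¬ b = c := fun hb => h.1 hb.symm
    simp only [subAux, if_neg hbc]
    exact ih h.2

theorem subAux_skip (c : Char) (s v w : List Char) (h : c ∉ v) :
    subAux (c :: s) (v ++ c :: w) = subAux s w := by
  induction v with
  | nil => simp [subAux]
  | cons a v ih =>
    simp only [List.mem_cons, not_or] at h
    have hac : ¬ a = c := fun hb => h.1 hb.symm
    simp only [List.cons_append, subAux, if_neg hac]
    exact ih h.2

-- ----- B side: the fold with a pointer equals the greedy check -----
theorem foldB_iff (sl : List Char) : ∀ (tl : List Char) (i : Nat), i ≤ sl.length →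
    ((tl.foldl (fun i ch => if i < sl.length ∧ sl.getD i 'a' = ch then i + 1 else i) i) = sl.length
      ↔ subAux (sl.drop i) tl = true) := by
  intro tl
  induction tl with
  | nil =>
    intro i hi
    rcases lt_or_eq_of_le hi with h | h
    · rw [List.drop_eq_getElem_cons h]
      simp [subAux, Nat.ne_of_lt h]
    · simp [h, subAux]
  | cons ch tl ih =>
    intro i hi
    rw [List.foldl_cons]
    by_cases hlt : i < sl.length
    · have hget : sl.getD i 'a' = sl[i] := by simp [List.getD_eq_getElem?_getD, hlt]
      by_cases heq : sl[i] = ch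
      · rw [if_pos ⟨hlt, by rw [hget, heq]⟩, ih (i + 1) hlt,
          List.drop_eq_getElem_cons hlt]
        simp [subAux, heq]
      · rw [if_neg (by rintro ⟨-, h⟩; exact heq (hget ▸ h)), ih i hi,
          List.drop_eq_getElem_cons hlt]
        have : ¬ ch = sl[i] := fun h => heq h.symm
        simp [subAux, this]
    · have hEq : i = sl.length := le_antisymm hi (le_of_not_gt hlt)
      rw [if_neg (by rintro ⟨h, -⟩; exact hlt h), ih i hi]
      simp [hEq, subAux]

-- ----- A side: characterise the position table -----
def occOf (c : Char) (tl : List Char) (s : Int) : List Int :=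
  ((PySem.List.enumerate tl s).filter (fun p => p.2 == c)).map (·.1)

theorem getD_buildPos (tl : List Char) (c : Char) :
    (buildPos tl).getD c [] = occOf c tl 0 := by
  unfold buildPos
  have h := PySem.Dict.getD_foldl_modify_append
    ((PySem.List.enumerate tl).map (fun p => (p.2, p.1))) PySem.Dict.empty c
  rw [List.foldl_map] at h
  simp only [occOf]
  rw [h]
  simp [List.filter_map, List.map_map, Function.comp_def]

theorem contains_buildPos (tl : List Char) (c : Char) :
    (buildPos tl).contains c = true ↔ c ∈ tl := by
  unfold buildPos
  rw [PySem.Dict.contains_iff_mem_keys,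
    PySem.Dict.keys_foldl_modify_key (PySem.List.enumerate tl) (fun p => p.2) []
      (fun _ p => (fun xs => xs ++ [p.1]))]
  rw [PySem.Set.mem_update]
  simp [PySem.List.map_snd_enumerate]

theorem occOf_cons (c a : Char) (u : List Char) (s : Int) :
    occOf c (a :: u) s = (if a = c then [s] else []) ++ occOf c u (s + 1) := by
  by_cases h : a = c <;>
    simp [occOf, PySem.List.enumerate_cons, h]

theorem occOf_append (c : Char) (u v : List Char) (s : Int) :
    occOf c (u ++ v) s = occOf c u s ++ occOf c v (s + u.length) := by
  simp [occOf, PySem.List.enumerate_append, List.filter_append]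

theorem occOf_eq_nil_iff (c : Char) (u : List Char) (s : Int) :
    occOf c u s = [] ↔ c ∉ u := by
  induction u generalizing s with
  | nil => simp [occOf]
  | cons a v ih =>
    rw [occOf_cons]
    by_cases h : a = c
    · simp [h]
    · have hca : ¬ c = a := fun hc => h hc.symm
      simp [h, ih, hca]

theorem mem_occOf_bounds (c : Char) (u : List Char) (s x : Int) (h : x ∈ occOf c u s) :
    s ≤ x ∧ x < s + u.length := by
  simp only [occOf, List.mem_map, List.mem_filter] at h
  obtain ⟨p, ⟨hp, -⟩, rfl⟩ := h
  rw [PySem.List.mem_enumerate_iff] at hp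
  obtain ⟨k, hk, rfl⟩ := hp
  constructor <;> simp <;> omega

theorem occOf_pairwise (c : Char) (u : List Char) (s : Int) :
    (occOf c u s).Pairwise (· ≤ ·) := by
  have h := (PySem.List.pairwise_lt_enumerate u s).filter (fun p => p.2 == c)
  refine (List.pairwise_map.mpr ?_)
  exact h.imp (fun hpq => le_of_lt hpq)

theorem occOf_first (c : Char) (u : List Char) (s : Int) (h : c ∈ u) :
    ∃ v w, u = v ++ c :: w ∧ c ∉ v ∧
      occOf c u s = (s + v.length) :: occOf c w (s + v.length + 1) := by
  induction u generalizing s with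
  | nil => cases h
  | cons a u ih =>
    by_cases hac : a = c
    · subst hac
      exact ⟨[], u, by simp, by simp, by rw [occOf_cons]; simp⟩
    · have hca : ¬ c = a := fun hc => hac hc.symm
      have hcu : c ∈ u := by
        rcases List.mem_cons.mp h with h' | h'
        · exact absurd h' hca
        · exact h'
      obtain ⟨v, w, huv, hcv, hocc⟩ := ih (s + 1) hcu
      refine ⟨a :: v, w, by simp [huv], by simp [hca, hcv], ?_⟩
      have e1 : s + 1 + (v.length : Int) = s + ((a :: v).length : Int) := by
        push_cast [List.length_cons]; ring
      rw [occOf_cons, if_neg hac, hocc, e1, List.nil_append]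

-- ----- the main bridge: A's bisect loop computes the greedy check on the suffix -----
theorem isSubA_eq_subAux (tl : List Char) : ∀ (s : List Char) (n : Nat), n ≤ tl.length →
    isSubA (buildPos tl) s ((n : Int) - 1) = subAux s (tl.drop n) := by
  intro s
  induction s with
  | nil => intro n hn; simp [isSubA, subAux]
  | cons c s ih =>
    intro n hn
    by_cases hc : c ∈ tl
    · have hcont : (buildPos tl).contains c = true := (contains_buildPos tl c).2 hc
      have hget := getD_buildPos tl c
      have hlen : ((tl.take n).length : Int) = n := by
        simp [List.length_take, Nat.min_eq_left hn]
      have hocc : occOf c tl 0 = occOf c (tl.take n) 0 ++ occOf c (tl.drop n) n := by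
        conv_lhs => rw [(List.take_append_drop n tl).symm]
        rw [occOf_append, zero_add, hlen]
      obtain ⟨hile, hlo, hhi⟩ :=
        PySem.List.bisectRight_spec (occOf c tl 0) ((n : Int) - 1) (occOf_pairwise c tl 0)
      have hA1b : ∀ x ∈ occOf c (tl.take n) 0, x ≤ (n : Int) - 1 := by
        intro x hx
        have h1 := mem_occOf_bounds _ _ _ _ hx
        have h2 : ((tl.take n).length : Int) = n := hlen
        omega
      have hA2b : ∀ x ∈ occOf c (tl.drop n) (n : Int), (n : Int) ≤ x :=
        fun x hx => (mem_occOf_bounds _ _ _ _ hx).1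
      have hlsum : (occOf c tl 0).length
          = (occOf c (tl.take n) 0).length + (occOf c (tl.drop n) (n : Int)).length := by
        rw [hocc, List.length_append]
      have hidx : PySem.List.bisectRight (occOf c tl 0) ((n : Int) - 1)
          = (occOf c (tl.take n) 0).length := by
        set i := PySem.List.bisectRight (occOf c tl 0) ((n : Int) - 1) with hi
        by_contra hne
        rcases Nat.lt_or_ge i (occOf c (tl.take n) 0).length with hlt | hge
        · have hilen : i < (occOf c tl 0).length := by omega
          have hmem : (occOf c tl 0)[i] ∈ occOf c (tl.take n) 0 := by
            have e := List.getElem_of_eq hocc hilen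
            rw [List.getElem_append_left hlt] at e
            rw [e]
            exact List.getElem_mem _
          have h3 := hhi i hilen (le_refl i)
          have h4 := hA1b _ hmem
          omega
        · have hgt : (occOf c (tl.take n) 0).length < i := lt_of_le_of_ne hge (Ne.symm hne)
          have hA2ne : (occOf c (tl.drop n) (n : Int)).length ≠ 0 := by omega
          have hjlen : (occOf c (tl.take n) 0).length < (occOf c tl 0).length := by omega
          have hmem : (occOf c tl 0)[(occOf c (tl.take n) 0).length] ∈
              occOf c (tl.drop n) (n : Int) := by
            have e := List.getElem_of_eq hocc hjlen
            rw [List.getElem_append_right (le_refl _)] at e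
            rw [e]
            exact List.getElem_mem _
          have h3 := hlo _ hjlen hgt
          have h4 := hA2b _ hmem
          omega
      simp only [isSubA, hcont]
      rw [if_neg (by simp)]
      simp only [hget, hidx]
      cases hA2eq : occOf c (tl.drop n) (n : Int) with
      | nil =>
        rw [if_pos (by rw [hlsum, hA2eq]; simp)]
        have hnm : c ∉ tl.drop n := (occOf_eq_nil_iff c _ _).1 hA2eq
        exact (subAux_not_mem c s _ hnm).symm
      | cons q A2' =>
        rw [if_neg (by rw [hlsum, hA2eq]; simp)]
        have hcd : c ∈ tl.drop n := by
          by_contra hnm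
          rw [(occOf_eq_nil_iff c _ ((n : Int))).2 hnm] at hA2eq
          cases hA2eq
        obtain ⟨v, w, hsplit, hcv, hoccd⟩ := occOf_first c (tl.drop n) (n : Int) hcd
        rw [hA2eq] at hoccd
        have hqv : q = (n : Int) + v.length := (List.cons.injEq _ _ _ _ ▸ hoccd).1
        have hlend : (tl.drop n).length = v.length + 1 + w.length := by
          rw [hsplit]
          simp only [List.length_append, List.length_cons]
          omega
        have hlen2 : n + v.length + 1 ≤ tl.length := by
          have := List.length_drop (l := tl) (i := n)
          omega
        have hdrop2 : tl.drop (n + v.length + 1) = w := by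
          have h1 : tl.drop (n + v.length + 1) = (tl.drop n).drop (v.length + 1) := by
            rw [List.drop_drop, show n + (v.length + 1) = n + v.length + 1 from by omega]
          rw [h1, hsplit, show v ++ c :: w = (v ++ [c]) ++ w by simp,
            List.drop_left' (by simp)]
        have hgetq : (occOf c tl 0).getD (occOf c (tl.take n) 0).length 0 = q := by
          rw [hocc, hA2eq]
          simp [List.getD_eq_getElem?_getD]
        rw [hgetq]
        have hq2 : q = ((n + v.length + 1 : Nat) : Int) - 1 := by push_cast; omega
        rw [hq2, ih (n + v.length + 1) hlen2, hdrop2, hsplit,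
          subAux_skip c s v w hcv]
    · have hcont : (buildPos tl).contains c = false := by
        cases h : (buildPos tl).contains c
        · rfl
        · exact absurd ((contains_buildPos tl c).1 h) hc
      simp only [isSubA, hcont, if_pos]
      exact (subAux_not_mem c s _ (fun h => hc (List.mem_of_mem_drop h))).symm

-- ===== VERDICT (by name: the statement is the Claim_ definition above) =====
theorem batch_is_subsequence_spec : Claim_equal_batch_is_subsequence := by
  intro t s_list _
  unfold Spec_batch_is_subsequence batch_is_subsequence batch_is_subsequence_alt
  simp only []
  refine List.map_congr_left (fun s _ => ?_)
  have hA := isSubA_eq_subAux t.toList s.toList 0 (Nat.zero_le _)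
  have hB := foldB_iff s.toList t.toList 0 (Nat.zero_le _)
  simp only [Nat.cast_zero, zero_sub, List.drop_zero] at hA hB
  rw [hA, ← Bool.decide_eq_true (b := subAux s.toList t.toList)]
  exact decide_eq_decide.mpr hB.symm
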